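-- pv_equiv track=rewrite | github.com/simcoreservers/nutetra | app/controllers/garden.py | get_growth_phase_for_week
-- ===== SOURCE A (Python) =====
-- def get_growth_phase_for_week(profile, week):
--     """Get the growth phase label for a specific week"""
--     growth_phases_text = profile.get('growth_phases', '')
--
--     if not growth_phases_text:
--         # Default phases if not defined
--         if week <= 3:
--             return "Seedling"
--         elif week <= 6:
--             return "Vegetative"
--         else:
--             return "Flowering"
--
--     # Parse the growth phases text
--     # Expected format: "Seedling: 1-3, Vegetative: 4-6, Flowering: 7-12"
--     # Or "1-3: Seedling\n4-6: Vegetative\n7-12: Flowering"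
--     phases = {}
--     try:
--         # First, normalize the string - replace newlines with commas
--         normalized_text = growth_phases_text.replace('\r\n', ',').replace('\n', ',')
--
--         for phase_entry in normalized_text.split(','):
--             phase_entry = phase_entry.strip()
--             if not phase_entry or ':' not in phase_entry:
--                 continue
--
--             # Split by colon
--             parts = [p.strip() for p in phase_entry.split(':', 1)]
--
--             # Determine which part is the phase name and which is the week range
--             if parts[0].replace('-', '').replace(' ', '').isdigit() or parts[0].isdigit():
--                 # Format is "1-3: Seedling" or "1: Seedling"
--                 weeks_range, phase_name = parts
--             else:
--                 # Format is "Seedling: 1-3" or "Seedling: 1"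
--                 phase_name, weeks_range = parts
--
--             # Process week ranges
--             for week_range in weeks_range.split(','):
--                 week_range = week_range.strip()
--                 if '-' in week_range:
--                     try:
--                         start, end = map(int, week_range.split('-'))
--                         for w in range(start, end + 1):
--                             phases[w] = phase_name
--                     except ValueError:
--                         # Skip invalid ranges
--                         continue
--                 else:
--                     try:
--                         w = int(week_range)
--                         phases[w] = phase_name
--                     except ValueError:
--                         # Skip invalid week numbers
--                         continue
--     except Exception as e:
--         # If any parsing error occurs, fall back to defaults
--         if week <= 3:
--             return "Seedling"
--         elif week <= 6:
--             return "Vegetative"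
--         else:
--             return "Flowering"
--
--     return phases.get(week, "Unknown")
-- ===== SOURCE B (Python) =====
-- def _bounds(wr):
--     """Parse a week spec into an inclusive (lo, hi) interval, or None."""
--     if '-' in wr:
--         parts = wr.split('-')
--         if len(parts) != 2:
--             return None
--         try:
--             return (int(parts[0]), int(parts[1]))
--         except ValueError:
--             return None
--     try:
--         k = int(wr)
--         return (k, k)
--     except ValueError:
--         return None
--
--
-- def get_growth_phase_for_week(profile, week):
--     """Get the growth phase label for a specific week"""
--     text = profile.get('growth_phases', '')
--     if not text:
--         return "Seedling" if week <= 3 else ("Vegetative" if week <= 6 else "Flowering")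
--     label = "Unknown"
--     for entry in text.replace('\r\n', ',').replace('\n', ',').split(','):
--         entry = entry.strip()
--         if ':' not in entry:
--             continue
--         left, right = (p.strip() for p in entry.split(':', 1))
--         if left.replace('-', '').replace(' ', '').isdigit() or left.isdigit():
--             rng, name = left, right
--         else:
--             name, rng = left, right
--         for wr in rng.split(','):
--             iv = _bounds(wr.strip())
--             if iv is not None and iv[0] <= week <= iv[1]:
--                 label = name
--     return label
-- ===== Notes on version B (the rewrite author's own statement) =====
-- stated objective: alternative
-- what changed: B never materializes the week->phase dict: instead of expanding every parsed range into per-week dict writes and looking the week up at the end, it keeps a single label and overwrites it whenever the target week lies in an entry's inclusive interval (last match wins, matching dict overwrite).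
import Mathlib
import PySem

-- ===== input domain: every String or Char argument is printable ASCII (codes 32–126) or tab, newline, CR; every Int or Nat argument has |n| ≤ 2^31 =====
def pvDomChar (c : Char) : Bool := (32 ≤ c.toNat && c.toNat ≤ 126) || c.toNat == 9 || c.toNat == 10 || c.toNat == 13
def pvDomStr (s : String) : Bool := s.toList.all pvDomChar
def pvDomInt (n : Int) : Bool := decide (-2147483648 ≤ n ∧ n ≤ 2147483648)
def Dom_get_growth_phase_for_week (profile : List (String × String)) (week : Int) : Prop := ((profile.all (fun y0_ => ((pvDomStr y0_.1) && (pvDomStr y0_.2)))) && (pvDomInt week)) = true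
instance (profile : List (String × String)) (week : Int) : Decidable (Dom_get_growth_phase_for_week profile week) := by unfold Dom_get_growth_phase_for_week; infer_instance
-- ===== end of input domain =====

-- B replaces A's per-week dict expansion of every range by a single last-match
-- interval-membership check against the target week (objective: alternative — no dict is built).


-- ===== PORT A =====
-- one iteration of A's outer loop: parse the entry and write phases[w] = name for every week w it covers
def pvEntryA (d : PySem.Dict Int String) (entry0 : String) : PySem.Dict Int String :=
  let entry := PySem.Str.strip entry0
  if entry = "" ∨ ¬ PySem.Str.isIn ":" entry then d
  else
    match PySem.Str.splitMax? entry ":" 1 with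
    | some [l, r] =>
      let p0 := PySem.Str.strip l
      let p1 := PySem.Str.strip r
      let pr :=
        if PySem.Str.strIsdigit (PySem.Str.replace (PySem.Str.replace p0 "-" "") " " "")
            ∨ PySem.Str.strIsdigit p0
        then (p0, p1) else (p1, p0)
      ((PySem.Str.split? pr.1 ",").getD []).foldl (fun d wr0 =>
        let wr := PySem.Str.strip wr0
        if PySem.Str.isIn "-" wr then
          match (PySem.Str.split? wr "-").getD [] with
          | [a, b] =>
            match PySem.Int.ofStr? a, PySem.Int.ofStr? b with
            | some s, some e =>
              (PySem.List.pyRange s (e + 1) 1).foldl (fun d w => d.insert w pr.2) d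
            | _, _ => d
          | _ => d
        else
          match PySem.Int.ofStr? wr with
          | some w => d.insert w pr.2
          | none => d) d
    | _ => d

def get_growth_phase_for_week (profile : List (String × String)) (week : Int) : String :=
  let text := (PySem.Dict.ofList profile).getD "growth_phases" ""
  if text = "" then
    if week ≤ 3 then "Seedling" else if week ≤ 6 then "Vegetative" else "Flowering"
  else
    let normalized := PySem.Str.replace (PySem.Str.replace text "\r\n" ",") "\n" ","
    let phases := ((PySem.Str.split? normalized ",").getD []).foldl pvEntryA PySem.Dict.empty
    phases.getD week "Unknown"

-- ===== PORT B =====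
-- parse one week spec into an inclusive (lo, hi) interval, or none
def pvBounds? (wr : String) : Option (Int × Int) :=
  if PySem.Str.isIn "-" wr then
    match (PySem.Str.split? wr "-").getD [] with
    | [a, b] =>
      match PySem.Int.ofStr? a, PySem.Int.ofStr? b with
      | some lo, some hi => some (lo, hi)
      | _, _ => none
    | _ => none
  else (PySem.Int.ofStr? wr).map (fun k => (k, k))

def pvEntryB (week : Int) (label : String) (entry0 : String) : String :=
  let entry := PySem.Str.strip entry0
  if ¬ PySem.Str.isIn ":" entry then label
  else
    match PySem.Str.splitMax? entry ":" 1 with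
    | some [l, r] =>
      let left := PySem.Str.strip l
      let right := PySem.Str.strip r
      let rn :=
        if PySem.Str.strIsdigit (PySem.Str.replace (PySem.Str.replace left "-" "") " " "")
            ∨ PySem.Str.strIsdigit left
        then (left, right) else (right, left)
      ((PySem.Str.split? rn.1 ",").getD []).foldl (fun lab wr =>
        match pvBounds? (PySem.Str.strip wr) with
        | some (lo, hi) => if lo ≤ week ∧ week ≤ hi then rn.2 else lab
        | none => lab) label
    | _ => label

def get_growth_phase_for_week_alt (profile : List (String × String)) (week : Int) : String :=
  let text := (PySem.Dict.ofList profile).getD "growth_phases" ""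
  if text = "" then
    if week ≤ 3 then "Seedling" else if week ≤ 6 then "Vegetative" else "Flowering"
  else
    ((PySem.Str.split? (PySem.Str.replace (PySem.Str.replace text "\r\n" ",") "\n" ",") ",").getD
        []).foldl (pvEntryB week) "Unknown"

-- ===== PRECONDITION & SPEC =====
def Spec_get_growth_phase_for_week (profile : List (String × String)) (week : Int) (out : String) : Prop := out = get_growth_phase_for_week_alt profile week
instance (profile : List (String × String)) (week : Int) (out : String) : Decidable (Spec_get_growth_phase_for_week profile week out) := by unfold Spec_get_growth_phase_for_week; infer_instance

-- ===== CLAIM (what is proved, stated in full; the proofs are below) =====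
def Claim_equal_get_growth_phase_for_week : Prop := ∀ (profile : List (String × String)) (week : Int), Dom_get_growth_phase_for_week profile week → Spec_get_growth_phase_for_week profile week (get_growth_phase_for_week profile week)

-- ===== LEMMAS AND PROOFS =====

theorem pv_get?_foldl_insert (ws : List Int) (d : PySem.Dict Int String) (n : String) (k : Int) :
    (ws.foldl (fun d w => d.insert w n) d).get? k
      = if k ∈ ws then some n else d.get? k := by
  induction ws generalizing d with
  | nil => simp
  | cons w ws ih =>
    simp only [List.foldl_cons, ih, PySem.Dict.get?_insert, List.mem_cons]
    split_ifs with h1 h2 h3 <;> simp_all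


theorem pv_entry_step (week : Int) (d : PySem.Dict Int String) (lab e : String)
    (h : lab = (d.get? week).getD "Unknown") :
    pvEntryB week lab e = ((pvEntryA d e).get? week).getD "Unknown" := by
  unfold pvEntryA pvEntryB
  generalize PySem.Str.strip e = s
  by_cases he : s = ""
  · subst he
    rw [if_pos (by decide : ¬ PySem.Str.isIn ":" "" = true), if_pos (Or.inl rfl)]
    exact h
  · cases hc : PySem.Str.isIn ":" s with
    | false =>
      rw [if_pos (by simpa using hc), if_pos (Or.inr (by simpa using hc))]
      exact h
    | true =>
      rw [if_neg (by simpa using hc), if_neg (by simp [he]; simpa using hc)]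
      cases hsp : PySem.Str.splitMax? s ":" 1 with
      | none => exact h
      | some parts =>
        match parts with
        | [] => exact h
        | [_] => exact h
        | _ :: _ :: _ :: _ => exact h
        | [l, r] =>
          simp only
          generalize ((PySem.Str.split? (if PySem.Str.strIsdigit
              (PySem.Str.replace (PySem.Str.replace (PySem.Str.strip l) "-" "") " " "")
                ∨ PySem.Str.strIsdigit (PySem.Str.strip l)
              then (PySem.Str.strip l, PySem.Str.strip r)
              else (PySem.Str.strip r, PySem.Str.strip l)).1 ",").getD []) = wrs
          generalize hnm : (if PySem.Str.strIsdigit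
              (PySem.Str.replace (PySem.Str.replace (PySem.Str.strip l) "-" "") " " "")
                ∨ PySem.Str.strIsdigit (PySem.Str.strip l)
              then (PySem.Str.strip l, PySem.Str.strip r)
              else (PySem.Str.strip r, PySem.Str.strip l)).2 = name
          clear hsp hc he hnm
          induction wrs generalizing d lab with
          | nil => exact h
          | cons wr wrs ih =>
            simp only [List.foldl_cons]
            apply ih
            unfold pvBounds?
            cases hd : PySem.Str.isIn "-" (PySem.Str.strip wr) with
            | true =>
              rw [if_pos rfl]
              cases hab : (PySem.Str.split? (PySem.Str.strip wr) "-").getD [] with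
              | nil => exact h
              | cons a t =>
                match t with
                | [] => exact h
                | _ :: _ :: _ => exact h
                | [b] =>
                  cases ha : PySem.Int.ofStr? a with
                  | none => cases hb : PySem.Int.ofStr? b <;> simp only [ha, hb] <;> exact h
                  | some lo =>
                    cases hb : PySem.Int.ofStr? b with
                    | none => simp only [ha, hb]; exact h
                    | some hi =>
                      simp only [ha, hb, if_true, pv_get?_foldl_insert, PySem.List.mem_pyRange_one]
                      by_cases hw : lo ≤ week ∧ week ≤ hi
                      · rw [if_pos hw, if_pos (by omega : lo ≤ week ∧ week < hi + 1)]
                        simp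
                      · rw [if_neg hw, if_neg (by omega : ¬ (lo ≤ week ∧ week < hi + 1))]
                        exact h
            | false =>
              simp only [Bool.false_eq_true, if_false]
              cases hk : PySem.Int.ofStr? (PySem.Str.strip wr) with
              | none => simp only; exact h
              | some k =>
                simp only [Option.map_some, PySem.Dict.get?_insert]
                by_cases hw : k ≤ week ∧ week ≤ k
                · rw [if_pos hw, if_pos (by omega : week = k)]
                  simp
                · rw [if_neg hw, if_neg (by omega : ¬ week = k)]
                  exact h

-- processing a whole list of entries preserves the label/dict correspondence at week
theorem pv_entries (week : Int) (entries : List String) (d : PySem.Dict Int String)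
    (lab : String) (h : lab = (d.get? week).getD "Unknown") :
    entries.foldl (pvEntryB week) lab
      = ((entries.foldl pvEntryA d).get? week).getD "Unknown" := by
  induction entries generalizing d lab with
  | nil => exact h
  | cons e es ih =>
    simp only [List.foldl_cons]
    exact ih (pvEntryA d e) (pvEntryB week lab e) (pv_entry_step week d lab e h)

-- ===== VERDICT (by name: the statement is the Claim_ definition above) =====
theorem get_growth_phase_for_week_spec : Claim_equal_get_growth_phase_for_week := by
  intro profile week _
  unfold Spec_get_growth_phase_for_week get_growth_phase_for_week get_growth_phase_for_week_alt
  by_cases ht : (PySem.Dict.ofList profile).getD "growth_phases" "" = ""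
  · simp only [ht, if_true]
  · rw [if_neg ht, if_neg ht]
    rw [PySem.Dict.getD_eq_get?_getD]
    exact (pv_entries week _ PySem.Dict.empty "Unknown" (by simp)).symm
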